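/- GENERATED by tools/mkclosed.py from the statements of the program gif (Gif/Spec/Units/*.lean) — do not edit; re-run it when a statement changes.
   THE BOTTOM-UP COMPOSITION: every unit's contract with no hypothesis about a callee left, from the unit theorems, in a
   topological order of the hypotheses (181 units, 39 functions). -/
import ProgX.Base.Closed
import Gif.Spec.Units.DGifBufferedInput_1
import Gif.Spec.Units.DGifBufferedInput_E
import Gif.Spec.Units.DGifCloseFile_5
import Gif.Spec.Units.DGifDecompressInput_1
import Gif.Spec.Units.DGifDecompressInput_3
import Gif.Spec.Units.DGifDecompressInput_E
import Gif.Spec.Units.DGifDecompressInput_P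
import Gif.Spec.Units.DGifDecompressLine_1
import Gif.Spec.Units.DGifDecompressLine_10
import Gif.Spec.Units.DGifDecompressLine_11
import Gif.Spec.Units.DGifDecompressLine_12
import Gif.Spec.Units.DGifDecompressLine_13
import Gif.Spec.Units.DGifDecompressLine_2
import Gif.Spec.Units.DGifDecompressLine_4
import Gif.Spec.Units.DGifDecompressLine_5
import Gif.Spec.Units.DGifDecompressLine_6
import Gif.Spec.Units.DGifDecompressLine_7
import Gif.Spec.Units.DGifDecompressLine_E
import Gif.Spec.Units.DGifDecompressLine_P
import Gif.Spec.Units.DGifDecreaseImageCounter_1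
import Gif.Spec.Units.DGifDecreaseImageCounter_E
import Gif.Spec.Units.DGifGetCodeNext_E
import Gif.Spec.Units.DGifGetCodeNext_P
import Gif.Spec.Units.DGifGetExtensionNext_E
import Gif.Spec.Units.DGifGetExtensionNext_P
import Gif.Spec.Units.DGifGetExtension_E
import Gif.Spec.Units.DGifGetExtension_P
import Gif.Spec.Units.DGifGetImageDesc_3
import Gif.Spec.Units.DGifGetImageDesc_4
import Gif.Spec.Units.DGifGetImageDesc_6
import Gif.Spec.Units.DGifGetImageDesc_E
import Gif.Spec.Units.DGifGetImageHeader_5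
import Gif.Spec.Units.DGifGetImageHeader_E
import Gif.Spec.Units.DGifGetImageHeader_P
import Gif.Spec.Units.DGifGetLine_1
import Gif.Spec.Units.DGifGetLine_E
import Gif.Spec.Units.DGifGetLine_P
import Gif.Spec.Units.DGifGetPrefixChar
import Gif.Spec.Units.DGifGetRecordType_2
import Gif.Spec.Units.DGifGetRecordType_E
import Gif.Spec.Units.DGifGetRecordType_P
import Gif.Spec.Units.DGifGetScreenDesc_3
import Gif.Spec.Units.DGifGetScreenDesc_6
import Gif.Spec.Units.DGifGetScreenDesc_E
import Gif.Spec.Units.DGifGetScreenDesc_P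
import Gif.Spec.Units.DGifGetWord_E
import Gif.Spec.Units.DGifGetWord_P
import Gif.Spec.Units.DGifOpen_1
import Gif.Spec.Units.DGifOpen_2
import Gif.Spec.Units.DGifOpen_E
import Gif.Spec.Units.DGifOpen_P
import Gif.Spec.Units.DGifSetupDecompress_2
import Gif.Spec.Units.DGifSetupDecompress_3
import Gif.Spec.Units.DGifSetupDecompress_E
import Gif.Spec.Units.DGifSetupDecompress_P
import Gif.Spec.Units.DGifSlurp_1
import Gif.Spec.Units.DGifSlurp_12
import Gif.Spec.Units.DGifSlurp_7
import Gif.Spec.Units.DGifSlurp_9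
import Gif.Spec.Units.DGifSlurp_E
import Gif.Spec.Units.DGifSlurp_P
import Gif.Spec.Units.GifAddExtensionBlock_2
import Gif.Spec.Units.GifAddExtensionBlock_3
import Gif.Spec.Units.GifAddExtensionBlock_E
import Gif.Spec.Units.GifBitSize
import Gif.Spec.Units.GifFreeExtensions_1
import Gif.Spec.Units.GifFreeExtensions_2
import Gif.Spec.Units.GifFreeExtensions_COMPOSITION
import Gif.Spec.Units.GifFreeMapObject
import Gif.Spec.Units.GifFreeSavedImages_1
import Gif.Spec.Units.GifFreeSavedImages_2
import Gif.Spec.Units.GifFreeSavedImages_3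
import Gif.Spec.Units.GifFreeSavedImages_COMPOSITION
import Gif.Spec.Units.GifMakeMapObject_1
import Gif.Spec.Units.GifMakeMapObject_2
import Gif.Spec.Units.GifMakeMapObject_E
import Gif.Spec.Units.digest_byte
import Gif.Spec.Units.digest_bytes
import Gif.Spec.Units.digest_extensions_E
import Gif.Spec.Units.digest_int
import Gif.Spec.Units.digest_map_1
import Gif.Spec.Units.digest_map_2
import Gif.Spec.Units.digest_map_E
import Gif.Spec.Units.gif_decode_1
import Gif.Spec.Units.gif_decode_E
import Gif.Spec.Units.gif_decode_P
import Gif.Spec.Units.mem_read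
import Gif.Spec.Units.openbsd_reallocarray
import Gif.Spec.Units.prog_main_E
import Gif.Spec.Units.prog_main_P
import Gif.Spec.Units.strncmp
import Gif.Spec.Units.sub_I_65535_1
import Gif.Spec.Units.DGifCloseFile_1
import Gif.Spec.Units.DGifCloseFile_2
import Gif.Spec.Units.DGifCloseFile_3
import Gif.Spec.Units.DGifCloseFile_4
import Gif.Spec.Units.DGifCloseFile_COMPOSITION
import Gif.Spec.Units.DGifDecompressLine_14
import Gif.Spec.Units.DGifDecompressLine_15
import Gif.Spec.Units.DGifDecompressLine_8
import Gif.Spec.Units.DGifDecompressLine_9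
import Gif.Spec.Units.DGifDecreaseImageCounter_2
import Gif.Spec.Units.DGifDecreaseImageCounter_3
import Gif.Spec.Units.DGifDecreaseImageCounter_COMPOSITION
import Gif.Spec.Units.DGifGetImageDesc_2
import Gif.Spec.Units.DGifOpen_4
import Gif.Spec.Units.DGifSlurp_4
import Gif.Spec.Units.DGifSlurp_5
import Gif.Spec.Units.GifAddExtensionBlock_1
import Gif.Spec.Units.GifAddExtensionBlock_COMPOSITION
import Gif.Spec.Units.GifMakeMapObject_COMPOSITION
import Gif.Spec.Units.InternalRead
import Gif.Spec.Units.digest_extensions_1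
import Gif.Spec.Units.digest_extensions_2
import Gif.Spec.Units.digest_extensions_COMPOSITION
import Gif.Spec.Units.digest_file_1
import Gif.Spec.Units.digest_file_2
import Gif.Spec.Units.digest_file_4
import Gif.Spec.Units.digest_file_5
import Gif.Spec.Units.digest_file_7
import Gif.Spec.Units.digest_map_COMPOSITION
import Gif.Spec.Units.gif_decode_5
import Gif.Spec.Units.run_ctors
import Gif.Spec.Units.DGifBufferedInput_2
import Gif.Spec.Units.DGifBufferedInput_3
import Gif.Spec.Units.DGifBufferedInput_COMPOSITION
import Gif.Spec.Units.DGifDecompressInput_2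
import Gif.Spec.Units.DGifDecompressInput_COMPOSITION
import Gif.Spec.Units.DGifDecompressLine_3
import Gif.Spec.Units.DGifDecompressLine_COMPOSITION
import Gif.Spec.Units.DGifGetCodeNext_1
import Gif.Spec.Units.DGifGetCodeNext_2
import Gif.Spec.Units.DGifGetCodeNext_COMPOSITION
import Gif.Spec.Units.DGifGetExtensionNext_1
import Gif.Spec.Units.DGifGetExtensionNext_2
import Gif.Spec.Units.DGifGetExtensionNext_COMPOSITION
import Gif.Spec.Units.DGifGetExtension_1
import Gif.Spec.Units.DGifGetExtension_2
import Gif.Spec.Units.DGifGetExtension_COMPOSITION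
import Gif.Spec.Units.DGifGetImageDesc_5
import Gif.Spec.Units.DGifGetImageHeader_3
import Gif.Spec.Units.DGifGetImageHeader_4
import Gif.Spec.Units.DGifGetLine_2
import Gif.Spec.Units.DGifGetLine_3
import Gif.Spec.Units.DGifGetLine_COMPOSITION
import Gif.Spec.Units.DGifGetRecordType_1
import Gif.Spec.Units.DGifGetRecordType_COMPOSITION
import Gif.Spec.Units.DGifGetScreenDesc_2
import Gif.Spec.Units.DGifGetScreenDesc_4
import Gif.Spec.Units.DGifGetScreenDesc_5
import Gif.Spec.Units.DGifGetWord_1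
import Gif.Spec.Units.DGifGetWord_COMPOSITION
import Gif.Spec.Units.DGifOpen_3
import Gif.Spec.Units.DGifSetupDecompress_1
import Gif.Spec.Units.DGifSetupDecompress_COMPOSITION
import Gif.Spec.Units.DGifSlurp_10
import Gif.Spec.Units.DGifSlurp_11
import Gif.Spec.Units.DGifSlurp_2
import Gif.Spec.Units.DGifSlurp_6
import Gif.Spec.Units.DGifSlurp_8
import Gif.Spec.Units.digest_file_3
import Gif.Spec.Units.digest_file_6
import Gif.Spec.Units.digest_file_COMPOSITION
import Gif.Spec.Units.gif_decode_4
import Gif.Spec.Units.DGifGetImageHeader_1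
import Gif.Spec.Units.DGifGetImageHeader_2
import Gif.Spec.Units.DGifGetImageHeader_6
import Gif.Spec.Units.DGifGetImageHeader_COMPOSITION
import Gif.Spec.Units.DGifGetScreenDesc_1
import Gif.Spec.Units.DGifGetScreenDesc_COMPOSITION
import Gif.Spec.Units.DGifOpen_5
import Gif.Spec.Units.DGifOpen_COMPOSITION
import Gif.Spec.Units.gif_decode_2
import Gif.Spec.Units.DGifGetImageDesc_1
import Gif.Spec.Units.DGifGetImageDesc_COMPOSITION
import Gif.Spec.Units.DGifSlurp_3
import Gif.Spec.Units.DGifSlurp_COMPOSITION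
import Gif.Spec.Units.gif_decode_3
import Gif.Spec.Units.gif_decode_COMPOSITION
import Gif.Spec.Units.prog_main_1
import Gif.Spec.Units.prog_main_COMPOSITION
namespace Gif.Closed
open X86 X86.User Asan Gif.Spec

/-- **The bytes of every function are in the reference state**: the `_hcode` hypothesis of its units. -/
structure AllCode (Lay : Layout) (u₀ : State) : Prop where
  /-- the bytes of `DGifBufferedInput` -/
  DGifBufferedInput : HasCodeNat Lay u₀ Gif.L.DGifBufferedInput.entry Gif.Code.code_DGifBufferedInput.nat Gif.L.DGifBufferedInput.size
  /-- the bytes of `DGifCloseFile` -/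
  DGifCloseFile : HasCodeNat Lay u₀ Gif.L.DGifCloseFile.entry Gif.Code.code_DGifCloseFile.nat Gif.L.DGifCloseFile.size
  /-- the bytes of `DGifDecompressInput` -/
  DGifDecompressInput : HasCodeNat Lay u₀ Gif.L.DGifDecompressInput.entry Gif.Code.code_DGifDecompressInput.nat Gif.L.DGifDecompressInput.size
  /-- the bytes of `DGifDecompressLine` -/
  DGifDecompressLine : HasCodeNat Lay u₀ Gif.L.DGifDecompressLine.entry Gif.Code.code_DGifDecompressLine.nat Gif.L.DGifDecompressLine.size
  /-- the bytes of `DGifDecreaseImageCounter` -/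
  DGifDecreaseImageCounter : HasCodeNat Lay u₀ Gif.L.DGifDecreaseImageCounter.entry Gif.Code.code_DGifDecreaseImageCounter.nat Gif.L.DGifDecreaseImageCounter.size
  /-- the bytes of `DGifGetCodeNext` -/
  DGifGetCodeNext : HasCodeNat Lay u₀ Gif.L.DGifGetCodeNext.entry Gif.Code.code_DGifGetCodeNext.nat Gif.L.DGifGetCodeNext.size
  /-- the bytes of `DGifGetExtensionNext` -/
  DGifGetExtensionNext : HasCodeNat Lay u₀ Gif.L.DGifGetExtensionNext.entry Gif.Code.code_DGifGetExtensionNext.nat Gif.L.DGifGetExtensionNext.size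
  /-- the bytes of `DGifGetExtension` -/
  DGifGetExtension : HasCodeNat Lay u₀ Gif.L.DGifGetExtension.entry Gif.Code.code_DGifGetExtension.nat Gif.L.DGifGetExtension.size
  /-- the bytes of `DGifGetImageDesc` -/
  DGifGetImageDesc : HasCodeNat Lay u₀ Gif.L.DGifGetImageDesc.entry Gif.Code.code_DGifGetImageDesc.nat Gif.L.DGifGetImageDesc.size
  /-- the bytes of `DGifGetImageHeader` -/
  DGifGetImageHeader : HasCodeNat Lay u₀ Gif.L.DGifGetImageHeader.entry Gif.Code.code_DGifGetImageHeader.nat Gif.L.DGifGetImageHeader.size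
  /-- the bytes of `DGifGetLine` -/
  DGifGetLine : HasCodeNat Lay u₀ Gif.L.DGifGetLine.entry Gif.Code.code_DGifGetLine.nat Gif.L.DGifGetLine.size
  /-- the bytes of `DGifGetPrefixChar` -/
  DGifGetPrefixChar : HasCodeNat Lay u₀ Gif.L.DGifGetPrefixChar.entry Gif.Code.code_DGifGetPrefixChar.nat Gif.L.DGifGetPrefixChar.size
  /-- the bytes of `DGifGetRecordType` -/
  DGifGetRecordType : HasCodeNat Lay u₀ Gif.L.DGifGetRecordType.entry Gif.Code.code_DGifGetRecordType.nat Gif.L.DGifGetRecordType.size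
  /-- the bytes of `DGifGetScreenDesc` -/
  DGifGetScreenDesc : HasCodeNat Lay u₀ Gif.L.DGifGetScreenDesc.entry Gif.Code.code_DGifGetScreenDesc.nat Gif.L.DGifGetScreenDesc.size
  /-- the bytes of `DGifGetWord` -/
  DGifGetWord : HasCodeNat Lay u₀ Gif.L.DGifGetWord.entry Gif.Code.code_DGifGetWord.nat Gif.L.DGifGetWord.size
  /-- the bytes of `DGifOpen` -/
  DGifOpen : HasCodeNat Lay u₀ Gif.L.DGifOpen.entry Gif.Code.code_DGifOpen.nat Gif.L.DGifOpen.size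
  /-- the bytes of `DGifSetupDecompress` -/
  DGifSetupDecompress : HasCodeNat Lay u₀ Gif.L.DGifSetupDecompress.entry Gif.Code.code_DGifSetupDecompress.nat Gif.L.DGifSetupDecompress.size
  /-- the bytes of `DGifSlurp` -/
  DGifSlurp : HasCodeNat Lay u₀ Gif.L.DGifSlurp.entry Gif.Code.code_DGifSlurp.nat Gif.L.DGifSlurp.size
  /-- the bytes of `GifAddExtensionBlock` -/
  GifAddExtensionBlock : HasCodeNat Lay u₀ Gif.L.GifAddExtensionBlock.entry Gif.Code.code_GifAddExtensionBlock.nat Gif.L.GifAddExtensionBlock.size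
  /-- the bytes of `GifBitSize` -/
  GifBitSize : HasCodeNat Lay u₀ Gif.L.GifBitSize.entry Gif.Code.code_GifBitSize.nat Gif.L.GifBitSize.size
  /-- the bytes of `GifFreeExtensions` -/
  GifFreeExtensions : HasCodeNat Lay u₀ Gif.L.GifFreeExtensions.entry Gif.Code.code_GifFreeExtensions.nat Gif.L.GifFreeExtensions.size
  /-- the bytes of `GifFreeMapObject` -/
  GifFreeMapObject : HasCodeNat Lay u₀ Gif.L.GifFreeMapObject.entry Gif.Code.code_GifFreeMapObject.nat Gif.L.GifFreeMapObject.size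
  /-- the bytes of `GifFreeSavedImages` -/
  GifFreeSavedImages : HasCodeNat Lay u₀ Gif.L.GifFreeSavedImages.entry Gif.Code.code_GifFreeSavedImages.nat Gif.L.GifFreeSavedImages.size
  /-- the bytes of `GifMakeMapObject` -/
  GifMakeMapObject : HasCodeNat Lay u₀ Gif.L.GifMakeMapObject.entry Gif.Code.code_GifMakeMapObject.nat Gif.L.GifMakeMapObject.size
  /-- the bytes of `digest_byte` -/
  digest_byte : HasCodeNat Lay u₀ Gif.L.digest_byte.entry Gif.Code.code_digest_byte.nat Gif.L.digest_byte.size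
  /-- the bytes of `digest_bytes` -/
  digest_bytes : HasCodeNat Lay u₀ Gif.L.digest_bytes.entry Gif.Code.code_digest_bytes.nat Gif.L.digest_bytes.size
  /-- the bytes of `digest_extensions` -/
  digest_extensions : HasCodeNat Lay u₀ Gif.L.digest_extensions.entry Gif.Code.code_digest_extensions.nat Gif.L.digest_extensions.size
  /-- the bytes of `digest_int` -/
  digest_int : HasCodeNat Lay u₀ Gif.L.digest_int.entry Gif.Code.code_digest_int.nat Gif.L.digest_int.size
  /-- the bytes of `digest_map` -/
  digest_map : HasCodeNat Lay u₀ Gif.L.digest_map.entry Gif.Code.code_digest_map.nat Gif.L.digest_map.size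
  /-- the bytes of `gif_decode` -/
  gif_decode : HasCodeNat Lay u₀ Gif.L.gif_decode.entry Gif.Code.code_gif_decode.nat Gif.L.gif_decode.size
  /-- the bytes of `mem_read` -/
  mem_read : HasCodeNat Lay u₀ Gif.L.mem_read.entry Gif.Code.code_mem_read.nat Gif.L.mem_read.size
  /-- the bytes of `openbsd_reallocarray` -/
  openbsd_reallocarray : HasCodeNat Lay u₀ Gif.L.openbsd_reallocarray.entry Gif.Code.code_openbsd_reallocarray.nat Gif.L.openbsd_reallocarray.size
  /-- the bytes of `prog_main` -/
  prog_main : HasCodeNat Lay u₀ Gif.L.prog_main.entry Gif.Code.code_prog_main.nat Gif.L.prog_main.size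
  /-- the bytes of `strncmp` -/
  strncmp : HasCodeNat Lay u₀ Gif.L.strncmp.entry Gif.Code.code_strncmp.nat Gif.L.strncmp.size
  /-- the bytes of `_sub_I_65535_1` -/
  sub_I_65535_1 : HasCodeNat Lay u₀ Gif.L._sub_I_65535_1.entry Gif.Code.code__sub_I_65535_1.nat Gif.L._sub_I_65535_1.size
  /-- the bytes of `InternalRead` -/
  InternalRead : HasCodeNat Lay u₀ Gif.L.InternalRead.entry Gif.Code.code_InternalRead.nat Gif.L.InternalRead.size
  /-- the bytes of `digest_file` -/
  digest_file : HasCodeNat Lay u₀ Gif.L.digest_file.entry Gif.Code.code_digest_file.nat Gif.L.digest_file.size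
  /-- the bytes of `run_ctors` -/
  run_ctors : HasCodeNat Lay u₀ ProgX.Base.L.run_ctors.entry ProgX.Base.Code.code_run_ctors.nat ProgX.Base.L.run_ctors.size
  /-- the bytes of `__asan_register_globals` -/
  asan_register_globals : HasCodeNat Lay u₀ ProgX.Base.L.__asan_register_globals.entry ProgX.Base.Code.code___asan_register_globals.nat ProgX.Base.L.__asan_register_globals.size

/-- **The contract of every unit, with no hypothesis about a callee left.** -/
structure Contracts (Lay : Layout) (μ : Microarch) (u₀ : State) : Prop where
  /-- unit `DGifBufferedInput_1` -/
  DGifBufferedInput_1 : Gif.Spec.DGifBufferedInput.Seg1 Lay μ u₀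
  /-- unit `DGifBufferedInput_E` -/
  DGifBufferedInput_E : Gif.Spec.DGifBufferedInput.SegE Lay μ u₀
  /-- unit `DGifCloseFile_5` -/
  DGifCloseFile_5 : Gif.Spec.DGifCloseFile.Seg5 Lay μ u₀
  /-- unit `DGifDecompressInput_1` -/
  DGifDecompressInput_1 : Gif.Spec.DGifDecompressInput.Seg1 Lay μ u₀
  /-- unit `DGifDecompressInput_3` -/
  DGifDecompressInput_3 : Gif.Spec.DGifDecompressInput.Seg3 Lay μ u₀
  /-- unit `DGifDecompressInput_E` -/
  DGifDecompressInput_E : Gif.Spec.DGifDecompressInput.SegE Lay μ u₀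
  /-- unit `DGifDecompressInput_P` -/
  DGifDecompressInput_P : Gif.Spec.DGifDecompressInput.SegP Lay μ u₀
  /-- unit `DGifDecompressLine_1` -/
  DGifDecompressLine_1 : Gif.Spec.DGifDecompressLine.Seg1 Lay μ u₀
  /-- unit `DGifDecompressLine_10` -/
  DGifDecompressLine_10 : Gif.Spec.DGifDecompressLine.Seg10 Lay μ u₀
  /-- unit `DGifDecompressLine_11` -/
  DGifDecompressLine_11 : Gif.Spec.DGifDecompressLine.Seg11 Lay μ u₀
  /-- unit `DGifDecompressLine_12` -/
  DGifDecompressLine_12 : Gif.Spec.DGifDecompressLine.Seg12 Lay μ u₀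
  /-- unit `DGifDecompressLine_13` -/
  DGifDecompressLine_13 : Gif.Spec.DGifDecompressLine.Seg13 Lay μ u₀
  /-- unit `DGifDecompressLine_2` -/
  DGifDecompressLine_2 : Gif.Spec.DGifDecompressLine.Seg2 Lay μ u₀
  /-- unit `DGifDecompressLine_4` -/
  DGifDecompressLine_4 : Gif.Spec.DGifDecompressLine.Seg4 Lay μ u₀
  /-- unit `DGifDecompressLine_5` -/
  DGifDecompressLine_5 : Gif.Spec.DGifDecompressLine.Seg5 Lay μ u₀
  /-- unit `DGifDecompressLine_6` -/
  DGifDecompressLine_6 : Gif.Spec.DGifDecompressLine.Seg6 Lay μ u₀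
  /-- unit `DGifDecompressLine_7` -/
  DGifDecompressLine_7 : Gif.Spec.DGifDecompressLine.Seg7 Lay μ u₀
  /-- unit `DGifDecompressLine_E` -/
  DGifDecompressLine_E : Gif.Spec.DGifDecompressLine.SegE Lay μ u₀
  /-- unit `DGifDecompressLine_P` -/
  DGifDecompressLine_P : Gif.Spec.DGifDecompressLine.SegP Lay μ u₀
  /-- unit `DGifDecreaseImageCounter_1` -/
  DGifDecreaseImageCounter_1 : Gif.Spec.DGifDecreaseImageCounter.Seg1 Lay μ u₀
  /-- unit `DGifDecreaseImageCounter_E` -/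
  DGifDecreaseImageCounter_E : Gif.Spec.DGifDecreaseImageCounter.SegE Lay μ u₀
  /-- unit `DGifGetCodeNext_E` -/
  DGifGetCodeNext_E : Gif.Spec.DGifGetCodeNext.SegE Lay μ u₀
  /-- unit `DGifGetCodeNext_P` -/
  DGifGetCodeNext_P : Gif.Spec.DGifGetCodeNext.SegP Lay μ u₀
  /-- unit `DGifGetExtensionNext_E` -/
  DGifGetExtensionNext_E : Gif.Spec.DGifGetExtensionNext.SegE Lay μ u₀
  /-- unit `DGifGetExtensionNext_P` -/
  DGifGetExtensionNext_P : Gif.Spec.DGifGetExtensionNext.SegP Lay μ u₀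
  /-- unit `DGifGetExtension_E` -/
  DGifGetExtension_E : Gif.Spec.DGifGetExtension.SegE Lay μ u₀
  /-- unit `DGifGetExtension_P` -/
  DGifGetExtension_P : Gif.Spec.DGifGetExtension.SegP Lay μ u₀
  /-- unit `DGifGetImageDesc_3` -/
  DGifGetImageDesc_3 : Gif.Spec.DGifGetImageDesc.Seg3 Lay μ u₀
  /-- unit `DGifGetImageDesc_4` -/
  DGifGetImageDesc_4 : Gif.Spec.DGifGetImageDesc.Seg4 Lay μ u₀
  /-- unit `DGifGetImageDesc_6` -/
  DGifGetImageDesc_6 : Gif.Spec.DGifGetImageDesc.Seg6 Lay μ u₀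
  /-- unit `DGifGetImageDesc_E` -/
  DGifGetImageDesc_E : Gif.Spec.DGifGetImageDesc.SegE Lay μ u₀
  /-- unit `DGifGetImageHeader_5` -/
  DGifGetImageHeader_5 : Gif.Spec.DGifGetImageHeader.Seg5 Lay μ u₀
  /-- unit `DGifGetImageHeader_E` -/
  DGifGetImageHeader_E : Gif.Spec.DGifGetImageHeader.SegE Lay μ u₀
  /-- unit `DGifGetImageHeader_P` -/
  DGifGetImageHeader_P : Gif.Spec.DGifGetImageHeader.SegP Lay μ u₀
  /-- unit `DGifGetLine_1` -/
  DGifGetLine_1 : Gif.Spec.DGifGetLine.Seg1 Lay μ u₀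
  /-- unit `DGifGetLine_E` -/
  DGifGetLine_E : Gif.Spec.DGifGetLine.SegE Lay μ u₀
  /-- unit `DGifGetLine_P` -/
  DGifGetLine_P : Gif.Spec.DGifGetLine.SegP Lay μ u₀
  /-- unit `DGifGetPrefixChar` -/
  DGifGetPrefixChar : ∀ (H : Heap) (rest : List Obj) (frames : List (Nat × FrameLayout)) (pv : Nat), Calls Lay μ ProgX.Base.WayInv (ProgX.Base.conv u₀) Gif.L.DGifGetPrefixChar.entry (Gif.Spec.DGifGetPrefixChar.spec H rest frames pv)
  /-- unit `DGifGetRecordType_2` -/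
  DGifGetRecordType_2 : Gif.Spec.DGifGetRecordType.Seg2 Lay μ u₀
  /-- unit `DGifGetRecordType_E` -/
  DGifGetRecordType_E : Gif.Spec.DGifGetRecordType.SegE Lay μ u₀
  /-- unit `DGifGetRecordType_P` -/
  DGifGetRecordType_P : Gif.Spec.DGifGetRecordType.SegP Lay μ u₀
  /-- unit `DGifGetScreenDesc_3` -/
  DGifGetScreenDesc_3 : Gif.Spec.DGifGetScreenDesc.Seg3 Lay μ u₀
  /-- unit `DGifGetScreenDesc_6` -/
  DGifGetScreenDesc_6 : Gif.Spec.DGifGetScreenDesc.Seg6 Lay μ u₀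
  /-- unit `DGifGetScreenDesc_E` -/
  DGifGetScreenDesc_E : Gif.Spec.DGifGetScreenDesc.SegE Lay μ u₀
  /-- unit `DGifGetScreenDesc_P` -/
  DGifGetScreenDesc_P : Gif.Spec.DGifGetScreenDesc.SegP Lay μ u₀
  /-- unit `DGifGetWord_E` -/
  DGifGetWord_E : Gif.Spec.DGifGetWord.SegE Lay μ u₀
  /-- unit `DGifGetWord_P` -/
  DGifGetWord_P : Gif.Spec.DGifGetWord.SegP Lay μ u₀
  /-- unit `DGifOpen_1` -/
  DGifOpen_1 : Gif.Spec.DGifOpen.Seg1 Lay μ u₀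
  /-- unit `DGifOpen_2` -/
  DGifOpen_2 : Gif.Spec.DGifOpen.Seg2 Lay μ u₀
  /-- unit `DGifOpen_E` -/
  DGifOpen_E : Gif.Spec.DGifOpen.SegE Lay μ u₀
  /-- unit `DGifOpen_P` -/
  DGifOpen_P : Gif.Spec.DGifOpen.SegP Lay μ u₀
  /-- unit `DGifSetupDecompress_2` -/
  DGifSetupDecompress_2 : Gif.Spec.DGifSetupDecompress.Seg2 Lay μ u₀
  /-- unit `DGifSetupDecompress_3` -/
  DGifSetupDecompress_3 : Gif.Spec.DGifSetupDecompress.Seg3 Lay μ u₀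
  /-- unit `DGifSetupDecompress_E` -/
  DGifSetupDecompress_E : Gif.Spec.DGifSetupDecompress.SegE Lay μ u₀
  /-- unit `DGifSetupDecompress_P` -/
  DGifSetupDecompress_P : Gif.Spec.DGifSetupDecompress.SegP Lay μ u₀
  /-- unit `DGifSlurp_1` -/
  DGifSlurp_1 : Gif.Spec.DGifSlurp.Seg1 Lay μ u₀
  /-- unit `DGifSlurp_12` -/
  DGifSlurp_12 : Gif.Spec.DGifSlurp.Seg12 Lay μ u₀
  /-- unit `DGifSlurp_7` -/
  DGifSlurp_7 : Gif.Spec.DGifSlurp.Seg7 Lay μ u₀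
  /-- unit `DGifSlurp_9` -/
  DGifSlurp_9 : Gif.Spec.DGifSlurp.Seg9 Lay μ u₀
  /-- unit `DGifSlurp_E` -/
  DGifSlurp_E : Gif.Spec.DGifSlurp.SegE Lay μ u₀
  /-- unit `DGifSlurp_P` -/
  DGifSlurp_P : Gif.Spec.DGifSlurp.SegP Lay μ u₀
  /-- unit `GifAddExtensionBlock_2` -/
  GifAddExtensionBlock_2 : Gif.Spec.GifAddExtensionBlock.Seg2 Lay μ u₀
  /-- unit `GifAddExtensionBlock_3` -/
  GifAddExtensionBlock_3 : Gif.Spec.GifAddExtensionBlock.Seg3 Lay μ u₀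
  /-- unit `GifAddExtensionBlock_E` -/
  GifAddExtensionBlock_E : Gif.Spec.GifAddExtensionBlock.SegE Lay μ u₀
  /-- unit `GifBitSize` -/
  GifBitSize : Calls Lay μ ProgX.Base.WayInv (ProgX.Base.conv u₀) Gif.L.GifBitSize.entry Gif.Spec.GifBitSize.spec
  /-- unit `GifFreeExtensions_1` -/
  GifFreeExtensions_1 : Gif.Spec.GifFreeExtensions.Seg1 Lay μ u₀
  /-- unit `GifFreeExtensions_2` -/
  GifFreeExtensions_2 : Gif.Spec.GifFreeExtensions.Seg2 Lay μ u₀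
  /-- unit `GifFreeExtensions_COMPOSITION` -/
  GifFreeExtensions_COMPOSITION : ∀ (H : Heap) (rest : List Obj) (frames : List (Nat × FrameLayout)) (e : Option Exts) (ob on : Nat), Calls Lay μ ProgX.Base.WayInv (ProgX.Base.conv u₀) Gif.L.GifFreeExtensions.entry (Gif.Spec.GifFreeExtensions.spec H rest frames e ob on)
  /-- unit `GifFreeMapObject` -/
  GifFreeMapObject : ∀ (H : Heap) (rest : List Obj) (frames : List (Nat × FrameLayout)) (colors n : Nat), Calls Lay μ ProgX.Base.WayInv (ProgX.Base.conv u₀) Gif.L.GifFreeMapObject.entry (Gif.Spec.GifFreeMapObject.spec H rest frames colors n)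
  /-- unit `GifFreeSavedImages_1` -/
  GifFreeSavedImages_1 : Gif.Spec.GifFreeSavedImages.Seg1 Lay μ u₀
  /-- unit `GifFreeSavedImages_2` -/
  GifFreeSavedImages_2 : Gif.Spec.GifFreeSavedImages.Seg2 Lay μ u₀
  /-- unit `GifFreeSavedImages_3` -/
  GifFreeSavedImages_3 : Gif.Spec.GifFreeSavedImages.Seg3 Lay μ u₀
  /-- unit `GifFreeSavedImages_COMPOSITION` -/
  GifFreeSavedImages_COMPOSITION : ∀ (H : Heap) (rest : List Obj) (frames : List (Nat × FrameLayout)) (F : Forest) (R : Rd), Calls Lay μ ProgX.Base.WayInv (ProgX.Base.conv u₀) Gif.L.GifFreeSavedImages.entry (Gif.Spec.GifFreeSavedImages.spec H rest frames F R)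
  /-- unit `GifMakeMapObject_1` -/
  GifMakeMapObject_1 : Gif.Spec.GifMakeMapObject.Seg1 Lay μ u₀
  /-- unit `GifMakeMapObject_2` -/
  GifMakeMapObject_2 : Gif.Spec.GifMakeMapObject.Seg2 Lay μ u₀
  /-- unit `GifMakeMapObject_E` -/
  GifMakeMapObject_E : Gif.Spec.GifMakeMapObject.SegE Lay μ u₀
  /-- unit `digest_byte` -/
  digest_byte : Calls Lay μ ProgX.Base.WayInv (ProgX.Base.conv u₀) Gif.L.digest_byte.entry Gif.Spec.digest_byte.spec
  /-- unit `digest_bytes` -/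
  digest_bytes : ∀ (H : Heap) (rest : List Obj) (frames : List (Nat × FrameLayout)), Calls Lay μ ProgX.Base.WayInv (ProgX.Base.conv u₀) Gif.L.digest_bytes.entry (Gif.Spec.digest_bytes.spec H rest frames)
  /-- unit `digest_extensions_E` -/
  digest_extensions_E : Gif.Spec.digest_extensions.SegE Lay μ u₀
  /-- unit `digest_int` -/
  digest_int : Calls Lay μ ProgX.Base.WayInv (ProgX.Base.conv u₀) Gif.L.digest_int.entry Gif.Spec.digest_int.spec
  /-- unit `digest_map_1` -/
  digest_map_1 : Gif.Spec.digest_map.Seg1 Lay μ u₀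
  /-- unit `digest_map_2` -/
  digest_map_2 : Gif.Spec.digest_map.Seg2 Lay μ u₀
  /-- unit `digest_map_E` -/
  digest_map_E : Gif.Spec.digest_map.SegE Lay μ u₀
  /-- unit `gif_decode_1` -/
  gif_decode_1 : Gif.Spec.gif_decode.Seg1 Lay μ u₀
  /-- unit `gif_decode_E` -/
  gif_decode_E : Gif.Spec.gif_decode.SegE Lay μ u₀
  /-- unit `gif_decode_P` -/
  gif_decode_P : Gif.Spec.gif_decode.SegP Lay μ u₀
  /-- unit `mem_read` -/
  mem_read : ∀ (H : Heap) (rest : List Obj) (frames : List (Nat × FrameLayout)) (F : Forest) (R : Rd) (n : Nat), Calls Lay μ ProgX.Base.WayInv (ProgX.Base.conv u₀) Gif.L.mem_read.entry (Gif.Spec.mem_read.spec H rest frames F R n)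
  /-- unit `openbsd_reallocarray` -/
  openbsd_reallocarray : ∀ (H : Heap) (rest : List Obj) (frames : List (Nat × FrameLayout)) (n c : Nat), Calls Lay μ ProgX.Base.WayInv (ProgX.Base.conv u₀) Gif.L.openbsd_reallocarray.entry (Gif.Spec.openbsd_reallocarray.spec H rest frames n c)
  /-- unit `prog_main_E` -/
  prog_main_E : Gif.Spec.prog_main.SegE Lay μ u₀
  /-- unit `prog_main_P` -/
  prog_main_P : Gif.Spec.prog_main.SegP Lay μ u₀
  /-- unit `strncmp` -/
  strncmp : ∀ (others : List Obj) (frames : List (Nat × FrameLayout)), Calls Lay μ ProgX.Base.WayInv (ProgX.Base.conv u₀) Gif.L.strncmp.entry (Gif.Spec.strncmp.spec others frames)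
  /-- unit `sub_I_65535_1` -/
  sub_I_65535_1 : Calls Lay μ ProgX.Base.WayInv (ProgX.Base.conv u₀) Gif.L._sub_I_65535_1.entry (Asan.ctorSpec Gif.Spec.rt)
  /-- unit `DGifCloseFile_1` -/
  DGifCloseFile_1 : Gif.Spec.DGifCloseFile.Seg1 Lay μ u₀
  /-- unit `DGifCloseFile_2` -/
  DGifCloseFile_2 : Gif.Spec.DGifCloseFile.Seg2 Lay μ u₀
  /-- unit `DGifCloseFile_3` -/
  DGifCloseFile_3 : Gif.Spec.DGifCloseFile.Seg3 Lay μ u₀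
  /-- unit `DGifCloseFile_4` -/
  DGifCloseFile_4 : Gif.Spec.DGifCloseFile.Seg4 Lay μ u₀
  /-- unit `DGifCloseFile_COMPOSITION` -/
  DGifCloseFile_COMPOSITION : ∀ (H : Heap) (rest : List Obj) (frames : List (Nat × FrameLayout)) (F : Forest) (R : Rd), Calls Lay μ ProgX.Base.WayInv (ProgX.Base.conv u₀) Gif.L.DGifCloseFile.entry (Gif.Spec.DGifCloseFile.spec H rest frames F R)
  /-- unit `DGifDecompressLine_14` -/
  DGifDecompressLine_14 : Gif.Spec.DGifDecompressLine.Seg14 Lay μ u₀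
  /-- unit `DGifDecompressLine_15` -/
  DGifDecompressLine_15 : Gif.Spec.DGifDecompressLine.Seg15 Lay μ u₀
  /-- unit `DGifDecompressLine_8` -/
  DGifDecompressLine_8 : Gif.Spec.DGifDecompressLine.Seg8 Lay μ u₀
  /-- unit `DGifDecompressLine_9` -/
  DGifDecompressLine_9 : Gif.Spec.DGifDecompressLine.Seg9 Lay μ u₀
  /-- unit `DGifDecreaseImageCounter_2` -/
  DGifDecreaseImageCounter_2 : Gif.Spec.DGifDecreaseImageCounter.Seg2 Lay μ u₀
  /-- unit `DGifDecreaseImageCounter_3` -/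
  DGifDecreaseImageCounter_3 : Gif.Spec.DGifDecreaseImageCounter.Seg3 Lay μ u₀
  /-- unit `DGifDecreaseImageCounter_COMPOSITION` -/
  DGifDecreaseImageCounter_COMPOSITION : ∀ (H : Heap) (rest : List Obj) (frames : List (Nat × FrameLayout)) (F : Forest) (R : Rd) (init : List Img) (g : Img), Calls Lay μ ProgX.Base.WayInv (ProgX.Base.conv u₀) Gif.L.DGifDecreaseImageCounter.entry (Gif.Spec.DGifDecreaseImageCounter.spec H rest frames F R init g)
  /-- unit `DGifGetImageDesc_2` -/
  DGifGetImageDesc_2 : Gif.Spec.DGifGetImageDesc.Seg2 Lay μ u₀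
  /-- unit `DGifOpen_4` -/
  DGifOpen_4 : Gif.Spec.DGifOpen.Seg4 Lay μ u₀
  /-- unit `DGifSlurp_4` -/
  DGifSlurp_4 : Gif.Spec.DGifSlurp.Seg4 Lay μ u₀
  /-- unit `DGifSlurp_5` -/
  DGifSlurp_5 : Gif.Spec.DGifSlurp.Seg5 Lay μ u₀
  /-- unit `GifAddExtensionBlock_1` -/
  GifAddExtensionBlock_1 : Gif.Spec.GifAddExtensionBlock.Seg1 Lay μ u₀
  /-- unit `GifAddExtensionBlock_COMPOSITION` -/
  GifAddExtensionBlock_COMPOSITION : ∀ (H : Heap) (rest : List Obj) (frames : List (Nat × FrameLayout)) (F : Forest) (R : Rd) (len : Nat), Calls Lay μ ProgX.Base.WayInv (ProgX.Base.conv u₀) Gif.L.GifAddExtensionBlock.entry (Gif.Spec.GifAddExtensionBlock.spec H rest frames F R len)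
  /-- unit `GifMakeMapObject_COMPOSITION` -/
  GifMakeMapObject_COMPOSITION : ∀ (H : Heap) (rest : List Obj) (frames : List (Nat × FrameLayout)) (count : Nat), Calls Lay μ ProgX.Base.WayInv (ProgX.Base.conv u₀) Gif.L.GifMakeMapObject.entry (Gif.Spec.GifMakeMapObject.spec H rest frames count)
  /-- unit `InternalRead` -/
  InternalRead : ∀ (H : Heap) (rest : List Obj) (frames : List (Nat × FrameLayout)) (F : Forest) (R : Rd) (n : Nat), Calls Lay μ ProgX.Base.WayInv (ProgX.Base.conv u₀) Gif.L.InternalRead.entry (Gif.Spec.InternalRead.spec H rest frames F R n)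
  /-- unit `digest_extensions_1` -/
  digest_extensions_1 : Gif.Spec.digest_extensions.Seg1 Lay μ u₀
  /-- unit `digest_extensions_2` -/
  digest_extensions_2 : Gif.Spec.digest_extensions.Seg2 Lay μ u₀
  /-- unit `digest_extensions_COMPOSITION` -/
  digest_extensions_COMPOSITION : ∀ (H : Heap) (rest : List Obj) (frames : List (Nat × FrameLayout)) (e : Option Exts), Calls Lay μ ProgX.Base.WayInv (ProgX.Base.conv u₀) Gif.L.digest_extensions.entry (Gif.Spec.digest_extensions.spec H rest frames e)
  /-- unit `digest_file_1` -/
  digest_file_1 : Gif.Spec.digest_file.Seg1 Lay μ u₀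
  /-- unit `digest_file_2` -/
  digest_file_2 : Gif.Spec.digest_file.Seg2 Lay μ u₀
  /-- unit `digest_file_4` -/
  digest_file_4 : Gif.Spec.digest_file.Seg4 Lay μ u₀
  /-- unit `digest_file_5` -/
  digest_file_5 : Gif.Spec.digest_file.Seg5 Lay μ u₀
  /-- unit `digest_file_7` -/
  digest_file_7 : Gif.Spec.digest_file.Seg7 Lay μ u₀
  /-- unit `digest_map_COMPOSITION` -/
  digest_map_COMPOSITION : ∀ (H : Heap) (rest : List Obj) (frames : List (Nat × FrameLayout)) (m : Option Map), Calls Lay μ ProgX.Base.WayInv (ProgX.Base.conv u₀) Gif.L.digest_map.entry (Gif.Spec.digest_map.spec H rest frames m)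
  /-- unit `gif_decode_5` -/
  gif_decode_5 : Gif.Spec.gif_decode.Seg5 Lay μ u₀
  /-- unit `run_ctors` -/
  run_ctors : Calls Lay μ ProgX.Base.WayInv (ProgX.Base.conv u₀) ProgX.Base.L.run_ctors.entry (Asan.runCtorsSpec Gif.Spec.rt)
  /-- unit `DGifBufferedInput_2` -/
  DGifBufferedInput_2 : Gif.Spec.DGifBufferedInput.Seg2 Lay μ u₀
  /-- unit `DGifBufferedInput_3` -/
  DGifBufferedInput_3 : Gif.Spec.DGifBufferedInput.Seg3 Lay μ u₀
  /-- unit `DGifBufferedInput_COMPOSITION` -/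
  DGifBufferedInput_COMPOSITION : ∀ (H : Heap) (rest : List Obj) (frames : List (Nat × FrameLayout)) (F : Forest) (R : Rd), Calls Lay μ ProgX.Base.WayInv (ProgX.Base.conv u₀) Gif.L.DGifBufferedInput.entry (Gif.Spec.DGifBufferedInput.spec H rest frames F R)
  /-- unit `DGifDecompressInput_2` -/
  DGifDecompressInput_2 : Gif.Spec.DGifDecompressInput.Seg2 Lay μ u₀
  /-- unit `DGifDecompressInput_COMPOSITION` -/
  DGifDecompressInput_COMPOSITION : ∀ (H : Heap) (rest : List Obj) (frames : List (Nat × FrameLayout)) (F : Forest) (R : Rd), Calls Lay μ ProgX.Base.WayInv (ProgX.Base.conv u₀) Gif.L.DGifDecompressInput.entry (Gif.Spec.DGifDecompressInput.spec H rest frames F R)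
  /-- unit `DGifDecompressLine_3` -/
  DGifDecompressLine_3 : Gif.Spec.DGifDecompressLine.Seg3 Lay μ u₀
  /-- unit `DGifDecompressLine_COMPOSITION` -/
  DGifDecompressLine_COMPOSITION : ∀ (H : Heap) (rest : List Obj) (frames : List (Nat × FrameLayout)) (F : Forest) (R : Rd) (n : Nat), Calls Lay μ ProgX.Base.WayInv (ProgX.Base.conv u₀) Gif.L.DGifDecompressLine.entry (Gif.Spec.DGifDecompressLine.spec H rest frames F R n)
  /-- unit `DGifGetCodeNext_1` -/
  DGifGetCodeNext_1 : Gif.Spec.DGifGetCodeNext.Seg1 Lay μ u₀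
  /-- unit `DGifGetCodeNext_2` -/
  DGifGetCodeNext_2 : Gif.Spec.DGifGetCodeNext.Seg2 Lay μ u₀
  /-- unit `DGifGetCodeNext_COMPOSITION` -/
  DGifGetCodeNext_COMPOSITION : ∀ (H : Heap) (rest : List Obj) (frames : List (Nat × FrameLayout)) (F : Forest) (R : Rd), Calls Lay μ ProgX.Base.WayInv (ProgX.Base.conv u₀) Gif.L.DGifGetCodeNext.entry (Gif.Spec.DGifGetCodeNext.spec H rest frames F R)
  /-- unit `DGifGetExtensionNext_1` -/
  DGifGetExtensionNext_1 : Gif.Spec.DGifGetExtensionNext.Seg1 Lay μ u₀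
  /-- unit `DGifGetExtensionNext_2` -/
  DGifGetExtensionNext_2 : Gif.Spec.DGifGetExtensionNext.Seg2 Lay μ u₀
  /-- unit `DGifGetExtensionNext_COMPOSITION` -/
  DGifGetExtensionNext_COMPOSITION : ∀ (H : Heap) (rest : List Obj) (frames : List (Nat × FrameLayout)) (F : Forest) (R : Rd), Calls Lay μ ProgX.Base.WayInv (ProgX.Base.conv u₀) Gif.L.DGifGetExtensionNext.entry (Gif.Spec.DGifGetExtensionNext.spec H rest frames F R)
  /-- unit `DGifGetExtension_1` -/
  DGifGetExtension_1 : Gif.Spec.DGifGetExtension.Seg1 Lay μ u₀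
  /-- unit `DGifGetExtension_2` -/
  DGifGetExtension_2 : Gif.Spec.DGifGetExtension.Seg2 Lay μ u₀
  /-- unit `DGifGetExtension_COMPOSITION` -/
  DGifGetExtension_COMPOSITION : ∀ (H : Heap) (rest : List Obj) (frames : List (Nat × FrameLayout)) (F : Forest) (R : Rd), Calls Lay μ ProgX.Base.WayInv (ProgX.Base.conv u₀) Gif.L.DGifGetExtension.entry (Gif.Spec.DGifGetExtension.spec H rest frames F R)
  /-- unit `DGifGetImageDesc_5` -/
  DGifGetImageDesc_5 : Gif.Spec.DGifGetImageDesc.Seg5 Lay μ u₀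
  /-- unit `DGifGetImageHeader_3` -/
  DGifGetImageHeader_3 : Gif.Spec.DGifGetImageHeader.Seg3 Lay μ u₀
  /-- unit `DGifGetImageHeader_4` -/
  DGifGetImageHeader_4 : Gif.Spec.DGifGetImageHeader.Seg4 Lay μ u₀
  /-- unit `DGifGetLine_2` -/
  DGifGetLine_2 : Gif.Spec.DGifGetLine.Seg2 Lay μ u₀
  /-- unit `DGifGetLine_3` -/
  DGifGetLine_3 : Gif.Spec.DGifGetLine.Seg3 Lay μ u₀
  /-- unit `DGifGetLine_COMPOSITION` -/
  DGifGetLine_COMPOSITION : ∀ (H : Heap) (rest : List Obj) (frames : List (Nat × FrameLayout)) (F : Forest) (R : Rd) (n : Nat), Calls Lay μ ProgX.Base.WayInv (ProgX.Base.conv u₀) Gif.L.DGifGetLine.entry (Gif.Spec.DGifGetLine.spec H rest frames F R n)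
  /-- unit `DGifGetRecordType_1` -/
  DGifGetRecordType_1 : Gif.Spec.DGifGetRecordType.Seg1 Lay μ u₀
  /-- unit `DGifGetRecordType_COMPOSITION` -/
  DGifGetRecordType_COMPOSITION : ∀ (H : Heap) (rest : List Obj) (frames : List (Nat × FrameLayout)) (F : Forest) (R : Rd), Calls Lay μ ProgX.Base.WayInv (ProgX.Base.conv u₀) Gif.L.DGifGetRecordType.entry (Gif.Spec.DGifGetRecordType.spec H rest frames F R)
  /-- unit `DGifGetScreenDesc_2` -/
  DGifGetScreenDesc_2 : Gif.Spec.DGifGetScreenDesc.Seg2 Lay μ u₀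
  /-- unit `DGifGetScreenDesc_4` -/
  DGifGetScreenDesc_4 : Gif.Spec.DGifGetScreenDesc.Seg4 Lay μ u₀
  /-- unit `DGifGetScreenDesc_5` -/
  DGifGetScreenDesc_5 : Gif.Spec.DGifGetScreenDesc.Seg5 Lay μ u₀
  /-- unit `DGifGetWord_1` -/
  DGifGetWord_1 : Gif.Spec.DGifGetWord.Seg1 Lay μ u₀
  /-- unit `DGifGetWord_COMPOSITION` -/
  DGifGetWord_COMPOSITION : ∀ (H : Heap) (rest : List Obj) (frames : List (Nat × FrameLayout)) (F : Forest) (R : Rd), Calls Lay μ ProgX.Base.WayInv (ProgX.Base.conv u₀) Gif.L.DGifGetWord.entry (Gif.Spec.DGifGetWord.spec H rest frames F R)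
  /-- unit `DGifOpen_3` -/
  DGifOpen_3 : Gif.Spec.DGifOpen.Seg3 Lay μ u₀
  /-- unit `DGifSetupDecompress_1` -/
  DGifSetupDecompress_1 : Gif.Spec.DGifSetupDecompress.Seg1 Lay μ u₀
  /-- unit `DGifSetupDecompress_COMPOSITION` -/
  DGifSetupDecompress_COMPOSITION : ∀ (H : Heap) (rest : List Obj) (frames : List (Nat × FrameLayout)) (F : Forest) (R : Rd), Calls Lay μ ProgX.Base.WayInv (ProgX.Base.conv u₀) Gif.L.DGifSetupDecompress.entry (Gif.Spec.DGifSetupDecompress.spec H rest frames F R)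
  /-- unit `DGifSlurp_10` -/
  DGifSlurp_10 : Gif.Spec.DGifSlurp.Seg10 Lay μ u₀
  /-- unit `DGifSlurp_11` -/
  DGifSlurp_11 : Gif.Spec.DGifSlurp.Seg11 Lay μ u₀
  /-- unit `DGifSlurp_2` -/
  DGifSlurp_2 : Gif.Spec.DGifSlurp.Seg2 Lay μ u₀
  /-- unit `DGifSlurp_6` -/
  DGifSlurp_6 : Gif.Spec.DGifSlurp.Seg6 Lay μ u₀
  /-- unit `DGifSlurp_8` -/
  DGifSlurp_8 : Gif.Spec.DGifSlurp.Seg8 Lay μ u₀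
  /-- unit `digest_file_3` -/
  digest_file_3 : Gif.Spec.digest_file.Seg3 Lay μ u₀
  /-- unit `digest_file_6` -/
  digest_file_6 : Gif.Spec.digest_file.Seg6 Lay μ u₀
  /-- unit `digest_file_COMPOSITION` -/
  digest_file_COMPOSITION : ∀ (H : Heap) (rest : List Obj) (frames : List (Nat × FrameLayout)) (F : Forest) (R : Rd), Calls Lay μ ProgX.Base.WayInv (ProgX.Base.conv u₀) Gif.L.digest_file.entry (Gif.Spec.digest_file.spec H rest frames F R)
  /-- unit `gif_decode_4` -/
  gif_decode_4 : Gif.Spec.gif_decode.Seg4 Lay μ u₀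
  /-- unit `DGifGetImageHeader_1` -/
  DGifGetImageHeader_1 : Gif.Spec.DGifGetImageHeader.Seg1 Lay μ u₀
  /-- unit `DGifGetImageHeader_2` -/
  DGifGetImageHeader_2 : Gif.Spec.DGifGetImageHeader.Seg2 Lay μ u₀
  /-- unit `DGifGetImageHeader_6` -/
  DGifGetImageHeader_6 : Gif.Spec.DGifGetImageHeader.Seg6 Lay μ u₀
  /-- unit `DGifGetImageHeader_COMPOSITION` -/
  DGifGetImageHeader_COMPOSITION : ∀ (H : Heap) (rest : List Obj) (frames : List (Nat × FrameLayout)) (F : Forest) (R : Rd), Calls Lay μ ProgX.Base.WayInv (ProgX.Base.conv u₀) Gif.L.DGifGetImageHeader.entry (Gif.Spec.DGifGetImageHeader.spec H rest frames F R)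
  /-- unit `DGifGetScreenDesc_1` -/
  DGifGetScreenDesc_1 : Gif.Spec.DGifGetScreenDesc.Seg1 Lay μ u₀
  /-- unit `DGifGetScreenDesc_COMPOSITION` -/
  DGifGetScreenDesc_COMPOSITION : ∀ (H : Heap) (rest : List Obj) (frames : List (Nat × FrameLayout)) (F : Forest) (R : Rd), Calls Lay μ ProgX.Base.WayInv (ProgX.Base.conv u₀) Gif.L.DGifGetScreenDesc.entry (Gif.Spec.DGifGetScreenDesc.spec H rest frames F R)
  /-- unit `DGifOpen_5` -/
  DGifOpen_5 : Gif.Spec.DGifOpen.Seg5 Lay μ u₀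
  /-- unit `DGifOpen_COMPOSITION` -/
  DGifOpen_COMPOSITION : ∀ (H : Heap) (rest : List Obj) (frames : List (Nat × FrameLayout)) (R : Rd), Calls Lay μ ProgX.Base.WayInv (ProgX.Base.conv u₀) Gif.L.DGifOpen.entry (Gif.Spec.DGifOpen.spec H rest frames R)
  /-- unit `gif_decode_2` -/
  gif_decode_2 : Gif.Spec.gif_decode.Seg2 Lay μ u₀
  /-- unit `DGifGetImageDesc_1` -/
  DGifGetImageDesc_1 : Gif.Spec.DGifGetImageDesc.Seg1 Lay μ u₀
  /-- unit `DGifGetImageDesc_COMPOSITION` -/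
  DGifGetImageDesc_COMPOSITION : ∀ (H : Heap) (rest : List Obj) (frames : List (Nat × FrameLayout)) (F : Forest) (R : Rd), Calls Lay μ ProgX.Base.WayInv (ProgX.Base.conv u₀) Gif.L.DGifGetImageDesc.entry (Gif.Spec.DGifGetImageDesc.spec H rest frames F R)
  /-- unit `DGifSlurp_3` -/
  DGifSlurp_3 : Gif.Spec.DGifSlurp.Seg3 Lay μ u₀
  /-- unit `DGifSlurp_COMPOSITION` -/
  DGifSlurp_COMPOSITION : ∀ (H : Heap) (rest : List Obj) (frames : List (Nat × FrameLayout)) (F : Forest) (R : Rd), Calls Lay μ ProgX.Base.WayInv (ProgX.Base.conv u₀) Gif.L.DGifSlurp.entry (Gif.Spec.DGifSlurp.spec H rest frames F R)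
  /-- unit `gif_decode_3` -/
  gif_decode_3 : Gif.Spec.gif_decode.Seg3 Lay μ u₀
  /-- unit `gif_decode_COMPOSITION` -/
  gif_decode_COMPOSITION : ∀ (H : Heap) (rest : List Obj) (frames : List (Nat × FrameLayout)), Calls Lay μ ProgX.Base.WayInv (ProgX.Base.conv u₀) Gif.L.gif_decode.entry (Gif.Spec.gif_decode.spec H rest frames)
  /-- unit `prog_main_1` -/
  prog_main_1 : Gif.Spec.prog_main.Seg1 Lay μ u₀
  /-- unit `prog_main_COMPOSITION` -/
  prog_main_COMPOSITION : ∀ (H : Heap) (rest : List Obj) (frames : List (Nat × FrameLayout)), Calls Lay μ ProgX.Base.WayInv (ProgX.Base.conv u₀) Gif.L.prog_main.entry (Gif.Spec.prog_main.spec H rest frames)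

end Gif.Closed
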